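-- pv_equiv track=rewrite | github.com/fuhaigao/leetcode | stackadapt.py | getNumberOfPossibleWays
-- ===== SOURCE A (Python) =====
-- def getNumberOfPossibleWays(n, k):
--     largestPossibleNumber = k*6
--     dp = [[0 for _ in range(largestPossibleNumber+1)] for _ in range(k+1)]
--     dp[0][0] = 1
--     for i in range(1, k+1):
--         for j in range(1, largestPossibleNumber+1):
--             for val in range(1, min(7, j+1)):
--                 dp[i][j] += dp[i-1][j-val]
--     return sum(dp[-1][n:])
-- ===== SOURCE B (Python) =====
-- def getNumberOfPossibleWays(n, k):
--     # Rolling 1D distribution of totals, updated per die with a sliding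
--     # window sum instead of A's 2D table with an inner faces loop.
--     size = 6 * k
--     dist = [1] + [0] * size
--     for _ in range(k):
--         new = [0] * (size + 1)
--         w = 0
--         for j in range(1, size + 1):
--             w += dist[j - 1]
--             if j >= 7:
--                 w -= dist[j - 7]
--             new[j] = w
--         dist = new
--     return sum(dist[n:])
-- ===== Notes on version B (the rewrite author's own statement) =====
-- stated objective: faster
-- what changed: Replaces the (k+1)x(6k+1) 2D DP table with triple loop by a single rolling 1D distribution updated per die via a prefix-sum sliding window, removing both the 2D table and the inner 6-way faces loop.
import Mathlib
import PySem

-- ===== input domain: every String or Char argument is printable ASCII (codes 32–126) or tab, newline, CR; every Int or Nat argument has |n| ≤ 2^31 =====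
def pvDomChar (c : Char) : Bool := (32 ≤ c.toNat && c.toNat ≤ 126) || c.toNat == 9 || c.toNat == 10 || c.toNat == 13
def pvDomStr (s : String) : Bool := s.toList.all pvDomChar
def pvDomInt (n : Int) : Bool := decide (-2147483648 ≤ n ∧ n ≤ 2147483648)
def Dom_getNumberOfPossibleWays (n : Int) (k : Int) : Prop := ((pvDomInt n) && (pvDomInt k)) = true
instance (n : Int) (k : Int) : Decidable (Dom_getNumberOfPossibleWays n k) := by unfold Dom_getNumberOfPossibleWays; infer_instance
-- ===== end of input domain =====

-- B replaces A's (k+1)×(6k+1) 2D table with triple loop by one rolling 1D distribution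
-- updated per die with a sliding-window running sum (objective: faster constant factor).

-- ===== PORT A =====
-- innermost 'for val in range(1, min(7, j+1)): dp[i][j] += dp[i-1][j-val]'
-- (i ∈ [1,k], j ≥ 1 throughout, so i.toNat / j.toNat are the exact Python indices)
def pvAInner (dp : List (List Int)) (i : Int) (j : Int) : List (List Int) :=
  (PySem.List.pyRange 1 (min 7 (j+1)) 1).foldl
    (fun dp val => dp.modify i.toNat (fun row => row.modify j.toNat
      (fun c => c + PySem.List.pyGetD (PySem.List.pyGetD dp (i-1) []) (j-val) 0))) dp

-- 'for j in range(1, largestPossibleNumber+1): …'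
def pvAJ (L : Int) (dp : List (List Int)) (i : Int) : List (List Int) :=
  (PySem.List.pyRange 1 (L+1) 1).foldl (fun dp j => pvAInner dp i j) dp

def getNumberOfPossibleWays (n : Int) (k : Int) : Int :=
  let largest := k * 6
  let dp : List (List Int) :=
    (PySem.List.pyRange 0 (k+1) 1).map (fun _ =>
      (PySem.List.pyRange 0 (largest+1) 1).map (fun _ => (0 : Int)))
  let dp := dp.modify 0 (fun row => row.set 0 1)       -- dp[0][0] = 1 (dp ≠ [] by Pre_)
  let dp := (PySem.List.pyRange 1 (k+1) 1).foldl (pvAJ largest) dp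
  (PySem.List.slice (PySem.List.pyGetD dp (-1) []) (some n) none).sum

-- ===== PORT B =====
-- body of 'for j in range(1, size+1)': running window w, new[j] = w (the writes go left
-- to right into the zero list, so appending produces the same list new)
def pvStepBody (dist : List Int) (st : List Int × Int) (j : Int) : List Int × Int :=
  let w := st.2 + PySem.List.pyGetD dist (j-1) 0
  let w := if 7 ≤ j then w - PySem.List.pyGetD dist (j-7) 0 else w
  (st.1 ++ [w], w)

def pvStep (L : Int) (dist : List Int) : List Int :=
  ((PySem.List.pyRange 1 (L+1) 1).foldl (pvStepBody dist) (([0] : List Int), (0 : Int))).1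

def getNumberOfPossibleWays_alt (n : Int) (k : Int) : Int :=
  let size := 6 * k
  let dist : List Int := 1 :: List.replicate size.toNat 0    -- [1] + [0]*size
  let dist := (PySem.List.pyRange 0 k 1).foldl (fun d _ => pvStep size d) dist
  (PySem.List.slice dist (some n) none).sum

-- ===== PRECONDITION & SPEC =====
-- Pre_ excludes k < 0, where A raises IndexError (dp is [] when it assigns dp[0][0]).
def Pre_getNumberOfPossibleWays (n : Int) (k : Int) : Prop := 0 ≤ k
instance (n : Int) (k : Int) : Decidable (Pre_getNumberOfPossibleWays n k) := by unfold Pre_getNumberOfPossibleWays; infer_instance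
def pvWitness_getNumberOfPossibleWays : Int × Int := (3, 2)

def Spec_getNumberOfPossibleWays (n : Int) (k : Int) (out : Int) : Prop := out = getNumberOfPossibleWays_alt n k
instance (n : Int) (k : Int) (out : Int) : Decidable (Spec_getNumberOfPossibleWays n k out) := by unfold Spec_getNumberOfPossibleWays; infer_instance

-- ===== CLAIM (what is proved, stated in full; the proofs are below) =====
def Claim_equal_getNumberOfPossibleWays : Prop := ∀ (n : Int) (k : Int), Dom_getNumberOfPossibleWays n k → Pre_getNumberOfPossibleWays n k → Spec_getNumberOfPossibleWays n k (getNumberOfPossibleWays n k)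

-- ===== LEMMAS AND PROOFS =====

-- The common reference: pvRows L m = the distribution over totals after m dice
-- (row m of A's table = B's dist after m iterations), a list of length L+1.
def pvZrow (L : Nat) : List Int := List.replicate (L+1) 0
def pvRow0 (L : Nat) : List Int := 1 :: List.replicate L 0
-- sum of the ≤6 cells before index j: Σ_{v < min 6 j} prev[j-1-v]
def pvSfx (p : List Int) (j : Nat) : Int :=
  ((List.range (min 6 j)).map (fun v => p.getD (j-1-v) 0)).sum
def pvConv (L : Nat) (p : List Int) : List Int :=
  0 :: (List.range L).map (fun t => pvSfx p (t+1))
def pvRows (L : Nat) : Nat → List Int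
  | 0 => pvRow0 L
  | (m+1) => pvConv L (pvRows L m)
-- row i of A's table while the j-loop has reached j = m
def pvPartial (L : Nat) (prev : List Int) (m : Nat) : List Int :=
  0 :: ((List.range m).map (fun t => pvSfx prev (t+1)) ++ List.replicate (L - m) 0)

-- generic list facts
theorem pvModifyModify {α : Type} (l : List α) (i : Nat) (f g : α → α) :
    (l.modify i f).modify i g = l.modify i (fun a => g (f a)) := by
  apply List.ext_getElem?
  intro j
  simp [List.getElem?_modify]
  split <;> cases l[j]? <;> rfl

theorem pvGetDModifyNe {α : Type} [Inhabited α] (l : List α) (i b : Nat) (f : α → α) (d : α)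
    (h : i ≠ b) : (l.modify i f).getD b d = l.getD b d := by
  simp [List.getD_eq_getElem?_getD, h]

theorem pvModifyAppend {α : Type} (P Q : List α) (x : α) (f : α → α) :
    (P ++ x :: Q).modify P.length f = P ++ f x :: Q := by
  induction P with
  | nil => simp
  | cons a as ih => simpa [List.modify_succ_cons] using ih

theorem pvModifyAppend' {α : Type} (P Q : List α) (x : α) (f : α → α) (n : Nat)
    (h : n = P.length) : (P ++ x :: Q).modify n f = P ++ f x :: Q := by
  rw [h, pvModifyAppend]

theorem pvGetDAppendLeft {α : Type} [Inhabited α] (P Q : List α) (n : Nat) (d : α)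
    (h : n < P.length) : (P ++ Q).getD n d = P.getD n d := by
  simp [List.getD_eq_getElem?_getD, List.getElem?_append_left h]

theorem pvSumShift (f : Nat → Int) (n : Nat) :
    ((List.range (n+1)).map f).sum = f 0 + ((List.range n).map (fun v => f (v+1))).sum := by
  rw [List.range_succ_eq_map]
  simp [List.map_map, Function.comp_def]

-- the sliding-window step of pvSfx
theorem pvSfxStep (p : List Int) (m : Nat) :
    pvSfx p (m+1) = pvSfx p m + p.getD m 0 - (if 6 ≤ m then p.getD (m-6) 0 else 0) := by
  unfold pvSfx
  have hidx : (List.range (min 6 (m+1))).map (fun v => p.getD (m+1-1-v) 0)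
      = (List.range (min 6 (m+1))).map (fun v => p.getD (m-v) 0) :=
    List.map_congr_left (fun v _ => by rw [show m+1-1-v = m-v by omega])
  have hidx2 : ∀ n : Nat, (List.range n).map (fun v => p.getD (m-1-v) 0)
      = (List.range n).map (fun v => p.getD (m-(v+1)) 0) :=
    fun n => List.map_congr_left (fun v _ => by rw [show m-1-v = m-(v+1) by omega])
  rw [hidx, hidx2]
  by_cases h6 : 6 ≤ m
  · rw [if_pos h6, show min 6 (m+1) = 5+1 by omega, show min 6 m = 5+1 by omega,
      pvSumShift, List.range_succ]
    simp [List.range_succ]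
    ring
  · rw [if_neg h6, show min 6 (m+1) = m+1 by omega, show min 6 m = m by omega, pvSumShift]
    rw [show m - 0 = m by omega]
    ring

-- ===== B side: the j-loop is the window fold =====
theorem pvStepFold (p : List Int) (m : Nat) :
    (List.range m).foldl (fun st (t : Nat) => pvStepBody p st (1+(t:Int))) (([0] : List Int), (0:Int))
      = (0 :: (List.range m).map (fun t => pvSfx p (t+1)), pvSfx p m) := by
  induction m with
  | zero => simp [pvSfx]
  | succ m ih =>
    rw [List.range_succ, List.foldl_append, ih]
    simp only [List.foldl_cons, List.foldl_nil, pvStepBody]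
    have h1 : (1:Int) + m - 1 = (m:Int) := by ring
    have hW : (if (7:Int) ≤ 1 + m then pvSfx p m + PySem.List.pyGetD p (1+(m:Int)-1) 0 - PySem.List.pyGetD p (1+(m:Int)-7) 0
        else pvSfx p m + PySem.List.pyGetD p (1+(m:Int)-1) 0) = pvSfx p (m+1) := by
      rw [h1]
      by_cases h : 6 ≤ m
      · rw [if_pos (by omega), show (1+(m:Int)-7) = ((m-6 : Nat) : Int) by omega,
          PySem.List.pyGetD_natCast, PySem.List.pyGetD_natCast]
        simp [pvSfxStep, h]
      · rw [if_neg (by omega)]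
        simp [pvSfxStep, h]
    rw [hW]
    simp

theorem pvStepEq (L : Int) (p : List Int) :
    pvStep L p = pvConv L.toNat p := by
  unfold pvStep pvConv
  rw [PySem.List.pyRange_one, show L + 1 - 1 = L by ring, List.foldl_map, pvStepFold p L.toNat]

theorem pvAltRows (L : Int) (m : Nat) :
    (List.range m).foldl (fun d (_ : Nat) => pvStep L d) (pvRow0 L.toNat) = pvRows L.toNat m := by
  induction m with
  | zero => rfl
  | succ m ih =>
    rw [List.range_succ, List.foldl_append, ih, List.foldl_cons, List.foldl_nil,
      pvStepEq]
    rfl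

-- ===== A side: collapse the triple loop to the same rows =====
-- value added by the innermost loop, read from the fixed previous row
theorem pvValSum (prev : List Int) (m : Nat) :
    ((PySem.List.pyRange 1 (min 7 (((1:Int)+m)+1)) 1).map
        (fun val => PySem.List.pyGetD prev ((1+(m:Int))-val) 0)).sum = pvSfx prev (m+1) := by
  rw [PySem.List.pyRange_one, List.map_map]
  rw [show ((min 7 (((1:Int)+m)+1)) - 1).toNat = min 6 (m+1) by omega]
  unfold pvSfx
  congr 1
  apply List.map_congr_left
  intro v hv
  simp only [List.mem_range] at hv
  simp only [Function.comp_apply]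
  rw [show (1+(m:Int))-(1+(v:Int)) = ((m - v : Nat) : Int) by omega, PySem.List.pyGetD_natCast,
    show m+1-1-v = m - v by omega]

theorem pvPrevStable (dp : List (List Int)) (i : Int) (hi : 1 ≤ i) (f : List Int → List Int) :
    PySem.List.pyGetD (dp.modify i.toNat f) (i-1) [] = PySem.List.pyGetD dp (i-1) [] := by
  rw [PySem.List.pyGetD_of_nonneg (h := by omega), PySem.List.pyGetD_of_nonneg (h := by omega),
    pvGetDModifyNe _ _ _ _ _ (by omega)]

theorem pvFoldModify (i j : Int) (hi : 1 ≤ i) (vs : List Int) :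
    ∀ dp : List (List Int),
    vs.foldl (fun dp val => dp.modify i.toNat (fun row => row.modify j.toNat
      (fun c => c + PySem.List.pyGetD (PySem.List.pyGetD dp (i-1) []) (j-val) 0))) dp
    = dp.modify i.toNat (fun row => row.modify j.toNat
      (fun c => c + (vs.map (fun val => PySem.List.pyGetD (PySem.List.pyGetD dp (i-1) []) (j-val) 0)).sum)) := by
  induction vs with
  | nil =>
    intro dp
    simp only [List.foldl_nil, List.map_nil, List.sum_nil]
    have e1 : (fun c : Int => c + 0) = id := funext fun c => by simp
    have e2 : (fun row : List Int => row) = id := rfl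
    simp only [e1, List.modify_id, e2]
  | cons v vs ih =>
    intro dp
    rw [List.foldl_cons, ih, pvModifyModify]
    have hst : ∀ val, PySem.List.pyGetD (PySem.List.pyGetD
        (dp.modify i.toNat (fun row => row.modify j.toNat
          (fun c => c + PySem.List.pyGetD (PySem.List.pyGetD dp (i-1) []) (j-v) 0))) (i-1) []) (j-val) 0
        = PySem.List.pyGetD (PySem.List.pyGetD dp (i-1) []) (j-val) 0 := by
      intro val; rw [pvPrevStable _ _ hi]
    simp only [hst, List.map_cons, List.sum_cons]
    congr 1
    funext row
    rw [pvModifyModify]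
    congr 1
    funext c
    ring

theorem pvAInnerEq (dp : List (List Int)) (i j : Int) (hi : 1 ≤ i) :
    pvAInner dp i j = dp.modify i.toNat (fun row => row.modify j.toNat
      (fun c => c + ((PySem.List.pyRange 1 (min 7 (j+1)) 1).map
        (fun val => PySem.List.pyGetD (PySem.List.pyGetD dp (i-1) []) (j-val) 0)).sum)) := by
  unfold pvAInner
  rw [pvFoldModify i j hi]

theorem pvPartialStep (L m : Nat) (prev : List Int) (hm : m < L) :
    (pvPartial L prev m).modify (m+1) (fun c => c + pvSfx prev (m+1)) = pvPartial L prev (m+1) := by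
  unfold pvPartial
  rw [List.modify_succ_cons, show L - m = (L - (m+1)) + 1 by omega, List.replicate_succ,
    pvModifyAppend' _ _ _ _ m (by simp)]
  simp [List.range_succ]

theorem pvAJFold (i : Int) (hi : 1 ≤ i) (L : Int)
    (P Q : List (List Int)) (prev : List Int)
    (hP : P.length = i.toNat) (hprev : P.getD (i.toNat - 1) [] = prev) :
    ∀ m, m ≤ L.toNat →
    (List.range m).foldl (fun dp (t : Nat) => pvAInner dp i (1+(t:Int))) (P ++ pvZrow L.toNat :: Q)
      = P ++ pvPartial L.toNat prev m :: Q := by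
  intro m
  induction m with
  | zero =>
    intro _
    simp [pvPartial, pvZrow, List.replicate_succ]
  | succ m ih =>
    intro hm
    rw [List.range_succ, List.foldl_append, ih (by omega), List.foldl_cons, List.foldl_nil]
    rw [pvAInnerEq _ _ _ hi]
    have hprev' : PySem.List.pyGetD (P ++ pvPartial L.toNat prev m :: Q) (i-1) [] = prev := by
      rw [PySem.List.pyGetD_of_nonneg (h := by omega),
        show (i-1).toNat = i.toNat - 1 by omega,
        pvGetDAppendLeft _ _ _ _ (by omega), hprev]
    rw [hprev']
    rw [show ((1:Int)+(m:Nat)).toNat = m + 1 by omega]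
    rw [pvModifyAppend' _ _ _ _ i.toNat hP.symm]
    rw [pvValSum prev m, pvPartialStep _ _ _ (by omega)]

theorem pvAJEq (L : Int) (i : Int) (hi : 1 ≤ i)
    (P Q : List (List Int)) (prev : List Int)
    (hP : P.length = i.toNat) (hprev : P.getD (i.toNat - 1) [] = prev) :
    pvAJ L (P ++ pvZrow L.toNat :: Q) i = P ++ pvConv L.toNat prev :: Q := by
  unfold pvAJ
  rw [PySem.List.pyRange_one, show L + 1 - 1 = L by ring, List.foldl_map,
    pvAJFold i hi L P Q prev hP hprev L.toNat (le_refl _)]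
  have : pvPartial L.toNat prev L.toNat = pvConv L.toNat prev := by
    unfold pvPartial pvConv
    simp
  rw [this]

theorem pvAFold (L : Int) (K : Nat) (m : Nat) (hm : m ≤ K) :
    (List.range m).foldl (fun dp (t : Nat) => pvAJ L dp (1+(t:Int)))
        (pvRow0 L.toNat :: List.replicate K (pvZrow L.toNat))
      = (List.range (m+1)).map (pvRows L.toNat) ++ List.replicate (K - m) (pvZrow L.toNat) := by
  induction m with
  | zero => simp [pvRows]
  | succ m ih =>
    rw [List.range_succ, List.foldl_append, ih (by omega), List.foldl_cons, List.foldl_nil]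
    rw [show K - m = (K - (m+1)) + 1 by omega, List.replicate_succ]
    have hP : ((List.range (m+1)).map (pvRows L.toNat)).length = ((1:Int)+(m:Nat)).toNat := by
      simp; omega
    have hprev : ((List.range (m+1)).map (pvRows L.toNat)).getD (((1:Int)+(m:Nat)).toNat - 1) []
        = pvRows L.toNat m := by
      rw [show ((1:Int)+(m:Nat)).toNat - 1 = m by omega]
      rw [List.getD_eq_getElem?_getD]
      simp
    rw [pvAJEq L _ (by omega) _ _ _ hP hprev]
    rw [List.range_succ (n := m+1), List.map_append]
    simp [pvRows]

-- assemble both mains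
theorem pvMapConstPyRange {α : Type} (b : Int) (c : α) :
    (PySem.List.pyRange 0 b 1).map (fun _ => c) = List.replicate b.toNat c := by
  rw [PySem.List.pyRange_one, List.map_map]
  simp [Function.comp_def, List.map_const']

theorem pvAEq (n k : Int) (hk : 0 ≤ k) :
    getNumberOfPossibleWays n k
      = (PySem.List.slice (pvRows (k*6).toNat k.toNat) (some n) none).sum := by
  unfold getNumberOfPossibleWays
  simp only
  rw [pvMapConstPyRange, pvMapConstPyRange]
  rw [show (k+1).toNat = k.toNat + 1 by omega, List.replicate_succ]
  have hz : (List.replicate ((k*6+1).toNat) (0:Int)) = pvZrow (k*6).toNat := by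
    unfold pvZrow
    rw [show (k*6+1).toNat = (k*6).toNat + 1 by omega]
  rw [hz]
  have hset : (pvZrow (k*6).toNat :: List.replicate k.toNat (pvZrow (k*6).toNat)).modify 0
      (fun row => row.set 0 1) = pvRow0 (k*6).toNat :: List.replicate k.toNat (pvZrow (k*6).toNat) := by
    rw [List.modify_zero_cons]
    unfold pvZrow pvRow0
    rw [List.replicate_succ, List.set_cons_zero]
  rw [hset]
  rw [PySem.List.pyRange_one, show k + 1 - 1 = k by ring, List.foldl_map]
  rw [pvAFold (k*6) k.toNat k.toNat (le_refl _)]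
  have hlast : PySem.List.pyGetD
      ((List.range (k.toNat+1)).map (pvRows (k*6).toNat) ++ List.replicate (k.toNat - k.toNat) (pvZrow (k*6).toNat)) (-1) []
      = pvRows (k*6).toNat k.toNat := by
    rw [Nat.sub_self, List.replicate_zero, List.append_nil]
    have hne : (List.range (k.toNat+1)).map (pvRows (k*6).toNat) ≠ [] := by
      simp [List.range_succ]
    rw [PySem.List.pyGetD_neg_one _ _ hne, List.getLast_eq_getElem]
    simp
  rw [hlast]

theorem pvBEq (n k : Int) :
    getNumberOfPossibleWays_alt n k
      = (PySem.List.slice (pvRows (k*6).toNat k.toNat) (some n) none).sum := by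
  unfold getNumberOfPossibleWays_alt
  simp only
  rw [PySem.List.pyRange_one, show k - 0 = k by ring, List.foldl_map]
  have h0 : (1 : Int) :: List.replicate (6*k).toNat 0 = pvRow0 (6*k).toNat := rfl
  rw [h0, pvAltRows (6*k) k.toNat, show (6*k) = k*6 by ring]

-- ===== VERDICT (by name: the statement is the Claim_ definition above) =====
theorem getNumberOfPossibleWays_spec : Claim_equal_getNumberOfPossibleWays := by
  intro n k _ hk
  unfold Pre_getNumberOfPossibleWays at hk
  unfold Spec_getNumberOfPossibleWays
  rw [pvAEq n k hk, pvBEq n k]
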